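-- pv_equiv track=rewrite | github.com/polymergen/pyeditor | main.py | find_contiguous_sequences
-- ===== SOURCE A (Python) =====
-- def find_contiguous_sequences(frames, min_length):
--     # Sort the frames to ensure they are in order
--     frames.sort()
--
--     # To store the contiguous sequences
--     contiguous_sequences = []
--     current_sequence = [frames[0]]
--
--     # Iterate through the sorted frames and find contiguous sequences
--     for i in range(1, len(frames)):
--         # Check if the current frame is contiguous with the previous frame
--         if frames[i] == frames[i - 1] + 1:
--             current_sequence.append(frames[i])
--         else:
--             # If not contiguous, store the current sequence and start a new one
--             if len(current_sequence) >= min_length: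
--                 contiguous_sequences.append(current_sequence)
--             current_sequence = [frames[i]]
--
--     # Don't forget to add the last sequence
--     if len(current_sequence) >= min_length:
--         contiguous_sequences.append(current_sequence)
--
--     return contiguous_sequences
-- ===== SOURCE B (Python) =====
-- def _runs(xs):
--     # Split a sorted list into maximal +1-contiguous runs.
--     out = []
--     i = 0
--     n = len(xs)
--     while i < n:
--         j = i + 1
--         while j < n and xs[j] == xs[j - 1] + 1:
--             j += 1
--         out.append(xs[i:j])
--         i = j
--     return out
--
--
-- def find_contiguous_sequences(frames, min_length):
--     frames.sort()
--     return [run for run in _runs(frames) if len(run) >= min_length]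
-- ===== Notes on version B (the rewrite author's own statement) =====
-- stated objective: simpler
-- what changed: B separates the work into two plain phases - a run-splitter that cuts the sorted list into maximal +1-contiguous runs, then a filter by min_length - instead of A's single-pass accumulator that interleaves run-building, length checks and result appends; B also returns [] on an empty list where A raises.
import Mathlib
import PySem

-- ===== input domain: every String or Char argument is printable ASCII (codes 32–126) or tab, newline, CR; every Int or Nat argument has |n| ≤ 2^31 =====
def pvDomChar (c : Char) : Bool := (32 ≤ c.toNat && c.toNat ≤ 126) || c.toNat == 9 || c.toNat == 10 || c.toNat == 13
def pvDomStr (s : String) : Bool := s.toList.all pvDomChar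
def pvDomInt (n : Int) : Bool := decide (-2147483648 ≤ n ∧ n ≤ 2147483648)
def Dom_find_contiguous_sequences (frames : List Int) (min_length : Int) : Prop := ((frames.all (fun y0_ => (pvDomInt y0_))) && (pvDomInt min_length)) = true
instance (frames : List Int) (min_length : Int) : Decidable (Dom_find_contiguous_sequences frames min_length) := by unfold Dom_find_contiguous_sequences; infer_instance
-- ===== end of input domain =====

-- B restructures A's single-pass accumulator as run-splitting followed by a length filter (objective: simpler).
-- Note: both A and B sort `frames` in place (frames.sort()); the equivalence proved here is about the return value.

-- ===== PORT A =====
-- A's for-loop over i in range(1, len(frames)): structural recursion over the tail of the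
-- sorted list, `prev` = frames[i-1], state = (contiguous_sequences, current_sequence).
def fcsLoopA (min_length : Int) : Int → List Int → List (List Int) → List Int → List (List Int)
  | _prev, [], contig, cur =>
      if (cur.length : Int) ≥ min_length then contig ++ [cur] else contig
  | prev, x :: xs, contig, cur =>
      if x = prev + 1 then
        fcsLoopA min_length x xs contig (cur ++ [x])
      else
        fcsLoopA min_length x xs
          (if (cur.length : Int) ≥ min_length then contig ++ [cur] else contig) [x]

def find_contiguous_sequences (frames : List Int) (min_length : Int) : List (List Int) :=
  match PySem.List.sorted frames (fun x => x) false with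
  | [] => []   -- Python A raises IndexError on frames[0] here; excluded by Pre_
  | f :: rest => fcsLoopA min_length f rest [] [f]

-- ===== PORT B =====
-- Source B's inner while loop: peel the maximal +1-contiguous run following `prev`,
-- returning (the rest of the run, the remaining suffix).
def splitRun (prev : Int) : List Int → List Int × List Int
  | [] => ([], [])
  | x :: xs =>
      if x = prev + 1 then
        let p := splitRun x xs
        (x :: p.1, p.2)
      else ([], x :: xs)

theorem splitRun_snd_length_le (prev : Int) (xs : List Int) :
    (splitRun prev xs).2.length ≤ xs.length := by
  induction xs generalizing prev with
  | nil => simp [splitRun]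
  | cons x xs ih =>
      simp only [splitRun]
      split
      · exact le_trans (ih x) (Nat.le_succ _)
      · simp

-- Source B's outer while loop: cut the sorted list into maximal contiguous runs.
def runsB : List Int → List (List Int)
  | [] => []
  | x :: xs =>
      let p := splitRun x xs
      (x :: p.1) :: runsB p.2
termination_by xs => xs.length
decreasing_by
  simpa using Nat.lt_succ_of_le (splitRun_snd_length_le x xs)

def find_contiguous_sequences_alt (frames : List Int) (min_length : Int) : List (List Int) :=
  (runsB (PySem.List.sorted frames (fun x => x) false)).filter
    (fun run => (run.length : Int) ≥ min_length)

-- ===== PRECONDITION & SPEC =====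
-- Pre_ excludes exactly the empty list, on which Python A raises IndexError at frames[0].
def Pre_find_contiguous_sequences (frames : List Int) (min_length : Int) : Prop := frames ≠ []
instance (frames : List Int) (min_length : Int) : Decidable (Pre_find_contiguous_sequences frames min_length) := by unfold Pre_find_contiguous_sequences; infer_instance

def pvWitness_find_contiguous_sequences : List Int × Int := ([3, 1, 2, 7], 2)

def Spec_find_contiguous_sequences (frames : List Int) (min_length : Int) (out : List (List Int)) : Prop := out = find_contiguous_sequences_alt frames min_length
instance (frames : List Int) (min_length : Int) (out : List (List Int)) : Decidable (Spec_find_contiguous_sequences frames min_length out) := by unfold Spec_find_contiguous_sequences; infer_instance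

-- ===== CLAIM (what is proved, stated in full; the proofs are below) =====
def Claim_equal_find_contiguous_sequences : Prop := ∀ (frames : List Int) (min_length : Int), Dom_find_contiguous_sequences frames min_length → Pre_find_contiguous_sequences frames min_length → Spec_find_contiguous_sequences frames min_length (find_contiguous_sequences frames min_length)

-- ===== LEMMAS AND PROOFS =====

-- A's loop without the `contig` accumulator: the list of runs it still has to produce,
-- `cur` being the run under construction and `prev` its last element.
def consRun (cur : List Int) (prev : Int) : List Int → List (List Int)
  | [] => [cur]
  | x :: xs => if x = prev + 1 then consRun (cur ++ [x]) x xs else cur :: consRun [x] x xs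

theorem fcsLoopA_eq_filter_consRun (min_length : Int) (rest : List Int) :
    ∀ (prev : Int) (contig : List (List Int)) (cur : List Int),
      fcsLoopA min_length prev rest contig cur =
        contig ++ (consRun cur prev rest).filter (fun run => (run.length : Int) ≥ min_length) := by
  induction rest with
  | nil =>
      intro prev contig cur
      simp only [fcsLoopA, consRun, List.filter]
      split_ifs with h <;> simp [h]
  | cons x xs ih =>
      intro prev contig cur
      simp only [fcsLoopA, consRun]
      split_ifs with h h2
      · exact ih x contig (cur ++ [x])
      · rw [ih x (contig ++ [cur]) [x]]
        simp [List.filter, h2]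
      · rw [ih x contig [x]]
        simp [List.filter, h2]

theorem consRun_eq_runsB (rest : List Int) :
    ∀ (prev : Int) (cur : List Int),
      consRun cur prev rest = (cur ++ (splitRun prev rest).1) :: runsB (splitRun prev rest).2 := by
  induction rest with
  | nil => intro prev cur; simp [consRun, splitRun, runsB]
  | cons x xs ih =>
      intro prev cur
      simp only [consRun, splitRun]
      split_ifs with h
      · rw [ih x (cur ++ [x])]
        simp
      · rw [ih x [x]]
        simp [runsB]

theorem consRun_singleton_eq_runsB (f : Int) (rest : List Int) :
    consRun [f] f rest = runsB (f :: rest) := by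
  rw [consRun_eq_runsB rest f [f]]
  simp [runsB]

-- ===== VERDICT (by name: the statement is the Claim_ definition above) =====
theorem find_contiguous_sequences_spec : Claim_equal_find_contiguous_sequences := by
  intro frames min_length _hDom hPre
  unfold Spec_find_contiguous_sequences find_contiguous_sequences find_contiguous_sequences_alt
  have hne : PySem.List.sorted frames (fun x => x) false ≠ [] := by
    intro h
    apply hPre
    have := PySem.List.sorted_perm (xs := frames) (key := fun x => x) (rev := false)
    rw [h] at this
    exact (List.Perm.nil_eq this).symm
  cases hs : PySem.List.sorted frames (fun x => x) false with
  | nil => exact absurd hs hne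
  | cons f rest =>
      have hred : (match (f :: rest : List Int) with
          | [] => ([] : List (List Int))
          | g :: r => fcsLoopA min_length g r [] [g]) = fcsLoopA min_length f rest [] [f] := rfl
      rw [hred, fcsLoopA_eq_filter_consRun, consRun_singleton_eq_runsB]
      simp
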